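-- pv_equiv track=rewrite | github.com/vtrn/simpleScrapping | app/publisher.py | split_by_spaces
-- ===== SOURCE A (Python) =====
-- def split_by_spaces(string, length):
--     """ форматирует строки, согласно настройкам
--
--     """
--     lower_bound = 0
--     upper_bound = 0
--     last_space_position = string.rindex(' ')
--     try:
--         while upper_bound < len(string):
--             upper_bound = string.rindex(' ', lower_bound, lower_bound + length)
--             if upper_bound == last_space_position:
--                 upper_bound = len(string)
--             if upper_bound - lower_bound > length:
--                 string.zfill(length)
--             yield string[lower_bound:upper_bound].strip()
--             lower_bound = upper_bound
--     except ValueError: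
--         raise ValueError('Невозможно получить подстроку в заданных границах')
-- ===== SOURCE B (Python) =====
-- def split_by_spaces(string, length):
--     """Same chunking as A, but via one precomputed list of space positions
--     consumed by a monotone pointer instead of repeated rindex window scans."""
--     spaces = [i for i, c in enumerate(string) if c == ' ']
--     if not spaces:
--         raise ValueError('substring not found')
--     n = len(string)
--     j = 0
--     lower = 0
--     upper = 0
--     while upper < n:
--         while j < len(spaces) and spaces[j] < lower + length:
--             j += 1
--         if j == 0 or spaces[j - 1] < lower:
--             raise ValueError('Невозможно получить подстроку в заданных границах')
--         upper = spaces[j - 1]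
--         if upper == spaces[-1]:
--             upper = n
--         yield string[lower:upper].strip()
--         lower = upper
-- ===== Notes on version B (the rewrite author's own statement) =====
-- stated objective: alternative
-- what changed: B precomputes the list of all space positions once and advances a monotone pointer over it to pick each chunk boundary, instead of A's repeated str.rindex backward scans over every window.
-- outside the precondition, e.g. on split_by_spaces('a b c d', -1): A returns ['a b c d'], B raises ValueError
import Mathlib
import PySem

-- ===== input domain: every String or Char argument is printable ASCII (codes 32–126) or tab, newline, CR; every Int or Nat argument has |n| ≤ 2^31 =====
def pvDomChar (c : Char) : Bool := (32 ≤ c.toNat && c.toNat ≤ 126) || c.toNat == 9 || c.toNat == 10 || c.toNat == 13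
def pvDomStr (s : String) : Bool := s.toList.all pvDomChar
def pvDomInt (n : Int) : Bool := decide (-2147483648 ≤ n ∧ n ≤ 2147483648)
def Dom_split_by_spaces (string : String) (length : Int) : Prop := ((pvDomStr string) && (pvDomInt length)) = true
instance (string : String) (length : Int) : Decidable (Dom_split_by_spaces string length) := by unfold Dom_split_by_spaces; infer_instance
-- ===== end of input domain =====

-- B replaces A's repeated rindex window scans by one precomputed list of space
-- positions consumed left-to-right by a monotone pointer (objective: alternative).


-- ===== PORT A =====
-- model of Python's str.rindex(' ', i, j): slice-adjusted bounds, highest index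
-- of a space inside [i, j); none = ValueError
def pvAdj (n i : Int) : Int := if i < 0 then max (n + i) 0 else min i n

def pvRindexSpace (cs : List Char) (i j : Int) : Option Int :=
  ((PySem.List.pyRange 0 cs.length 1).filter (fun p =>
    decide (pvAdj cs.length i ≤ p) && decide (p < pvAdj cs.length j) &&
    (PySem.List.pyGet? cs p == some ' '))).getLast?

-- A's while loop; the fuel (= len+1) covers every terminating run inside Pre_
def pvALoop (cs : List Char) (length lastSp : Int) :
    Nat → Int → Int → List String → List String
  | 0, _, _, acc => acc.reverse
  | fuel + 1, lb, ub, acc =>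
    if ub < (cs.length : Int) then
      match pvRindexSpace cs lb (lb + length) with
      | none => acc.reverse        -- the translated ValueError (excluded by Pre_)
      | some u =>
        let ub' : Int := if u = lastSp then (cs.length : Int) else u
        -- A's 'string.zfill(length)' is a discarded no-op
        pvALoop cs length lastSp fuel ub' ub'
          (String.ofList (PySem.Chars.strip (PySem.List.slice cs (some lb) (some ub'))) :: acc)
    else acc.reverse

def split_by_spaces (string : String) (length : Int) : List String :=
  let cs := string.toList
  match pvRindexSpace cs 0 cs.length with
  | none => []                     -- plain ValueError of the pre-try rindex (excluded by Pre_)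
  | some lastSp => pvALoop cs length lastSp (cs.length + 1) 0 0 []

-- ===== PORT B =====
-- [i for i, c in enumerate(string) if c == ' ']
def pvSpaces (cs : List Char) : List Int :=
  (PySem.List.enumerate cs 0).filterMap (fun ic => if ic.2 = ' ' then some ic.1 else none)

-- the inner 'while j < len(spaces) and spaces[j] < lower + length: j += 1'
-- (structural fuel ps.length - j bounds the remaining pointer steps exactly)
def pvAdvance (ps : List Int) (bound : Int) : Nat → Nat → Nat
  | 0, j => j
  | fuel + 1, j =>
    if h : j < ps.length then
      if ps[j] < bound then pvAdvance ps bound fuel (j + 1) else j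
    else j

def pvBLoop (cs : List Char) (length : Int) (ps : List Int) :
    Nat → Int → Int → Nat → List String → List String
  | 0, _, _, _, acc => acc.reverse
  | fuel + 1, lower, upper, j, acc =>
    if upper < (cs.length : Int) then
      let j1 := pvAdvance ps (lower + length) (ps.length - j) j
      if j1 = 0 then acc.reverse   -- raise ValueError (excluded by Pre_)
      else
        match ps[j1 - 1]? with
        | none => acc.reverse      -- unreachable: j1 ≤ len(spaces)
        | some c =>
          if c < lower then acc.reverse   -- raise ValueError (excluded by Pre_)
          else
            let upper' : Int := if ps.getLast? = some c then (cs.length : Int) else c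
            pvBLoop cs length ps fuel upper' upper' j1
              (String.ofList (PySem.Chars.strip (PySem.List.slice cs (some lower) (some upper'))) :: acc)
    else acc.reverse

def split_by_spaces_alt (string : String) (length : Int) : List String :=
  let cs := string.toList
  let ps := pvSpaces cs
  if ps.isEmpty then []            -- raise ValueError: no space at all (excluded by Pre_)
  else pvBLoop cs length ps (cs.length + 1) 0 0 0 []

-- ===== PRECONDITION & SPEC =====
-- Pre_ holds exactly where A terminates normally with length ≥ 1: the string has a
-- space, the first space fits in the first window, and consecutive spaces are less
-- than `length` apart.  It excludes (a) inputs where A raises or loops forever and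
-- (b) the negative-length inputs on which rindex's negative-end wraparound lets A
-- return a value by accident; B raises the ValueError on all excluded inputs.
def Pre_split_by_spaces (string : String) (length : Int) : Prop :=
  pvSpaces string.toList ≠ [] ∧
  (pvSpaces string.toList).headD 0 < length ∧
  ∀ pr ∈ (pvSpaces string.toList).zip (pvSpaces string.toList).tail, pr.2 < pr.1 + length
instance (string : String) (length : Int) : Decidable (Pre_split_by_spaces string length) := by
  unfold Pre_split_by_spaces; infer_instance

def pvWitness_split_by_spaces : String × Int := ("a b", 4)

def Spec_split_by_spaces (string : String) (length : Int) (out : List String) : Prop := out = split_by_spaces_alt string length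
instance (string : String) (length : Int) (out : List String) : Decidable (Spec_split_by_spaces string length out) := by unfold Spec_split_by_spaces; infer_instance

-- ===== CLAIM (what is proved, stated in full; the proofs are below) =====
def Claim_equal_split_by_spaces : Prop := ∀ (string : String) (length : Int), Dom_split_by_spaces string length → Pre_split_by_spaces string length → Spec_split_by_spaces string length (split_by_spaces string length)

-- ===== LEMMAS AND PROOFS =====

lemma pvEnum_eq (cs : List Char) : ∀ s : Int,
    PySem.List.enumerate cs s = (List.range cs.length).map (fun k : Nat => (s + (k : Int), cs.getD k ' ')) := by
  induction cs with
  | nil => intro s; simp [PySem.List.enumerate]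
  | cons c t ih =>
    intro s
    rw [PySem.List.enumerate]
    rw [List.length_cons, List.range_succ_eq_map, List.map_cons, List.map_map, ih (s + 1)]
    refine congrArg₂ _ (by simp) ?_
    apply List.map_congr_left
    intro k _
    simp only [Function.comp_apply, List.getD_cons_succ, Prod.mk.injEq]
    exact ⟨by push_cast; ring, trivial⟩

lemma pvMapFilter {α β : Type} (p : α → Prop) [DecidablePred p] (f : α → β) (l : List α) :
    l.filterMap (fun a => if p a then some (f a) else none)
      = (l.filter (fun a => decide (p a))).map f := by
  induction l with
  | nil => rfl
  | cons a t ih => by_cases hp : p a <;> simp [hp, ih]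

-- the space-position list, characterised over pyRange (the base of pvRindexSpace)
lemma pvSpaces_eq (cs : List Char) :
    pvSpaces cs = (PySem.List.pyRange 0 cs.length 1).filter
      (fun p => PySem.List.pyGet? cs p == some ' ') := by
  rw [pvSpaces, pvEnum_eq cs 0, List.filterMap_map, PySem.List.pyRange_zero_nat, List.filter_map]
  have h1 : ((fun ic : Int × Char => if ic.2 = ' ' then some ic.1 else none) ∘
      (fun k : Nat => ((0 : Int) + (k : Int), cs.getD k ' ')))
      = fun k : Nat => if cs.getD k ' ' = ' ' then some ((k : Int)) else none := by
    funext k; simp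
  rw [h1, pvMapFilter (fun k => cs.getD k ' ' = ' ') (fun k : Nat => (k : Int))]
  refine congrArg _ ?_
  apply List.filter_congr
  intro k hk
  have hk' : k < cs.length := List.mem_range.1 hk
  simp only [Function.comp_apply, PySem.List.pyGet?_natCast, List.getElem?_eq_getElem hk',
    List.getD_eq_getElem?_getD, Option.getD_some]
  by_cases hsp : cs[k] = ' ' <;> simp [hsp]

lemma pvSpaces_pairwise (cs : List Char) : (pvSpaces cs).Pairwise (· < ·) := by
  rw [pvSpaces_eq]
  exact List.Pairwise.sublist List.filter_sublist (PySem.List.pairwise_lt_pyRange_one 0 cs.length)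

lemma pvSpaces_mem {cs : List Char} {p : Int} (h : p ∈ pvSpaces cs) :
    0 ≤ p ∧ p < cs.length ∧ PySem.List.pyGet? cs p = some ' ' := by
  rw [pvSpaces_eq] at h
  rcases List.mem_filter.1 h with ⟨hr, hs⟩
  rcases (PySem.List.mem_pyRange_one).1 hr with ⟨h0, h1⟩
  exact ⟨h0, h1, by simpa using hs⟩

-- pvRindexSpace over the window [lb, lb+len) is the last qualifying space position
lemma pvRindex_window (cs : List Char) (lb len : Int) (h0 : 0 ≤ lb)
    (hn : lb ≤ cs.length) (hl : 0 < len) :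
    pvRindexSpace cs lb (lb + len) =
      ((pvSpaces cs).filter (fun p => decide (lb ≤ p) && decide (p < lb + len))).getLast? := by
  rw [pvRindexSpace, pvSpaces_eq, List.filter_filter]
  refine congrArg _ ?_
  apply List.filter_congr
  intro p hp
  rcases (PySem.List.mem_pyRange_one).1 hp with ⟨hp0, hp1⟩
  have ha1 : pvAdj cs.length lb = lb := by
    rw [pvAdj, if_neg (by omega)]; omega
  have ha2 : pvAdj cs.length (lb + len) = min (lb + len) (cs.length : Int) := by
    rw [pvAdj, if_neg (by omega)]
  have e1 : decide (pvAdj cs.length lb ≤ p) = decide (lb ≤ p) :=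
    decide_eq_decide.2 (by rw [ha1])
  have e2 : decide (p < pvAdj cs.length (lb + len)) = decide (p < lb + len) :=
    decide_eq_decide.2 (by rw [ha2]; omega)
  rw [e1, e2]

lemma pvRindex_full (cs : List Char) :
    pvRindexSpace cs 0 cs.length = (pvSpaces cs).getLast? := by
  rw [pvRindexSpace, pvSpaces_eq]
  refine congrArg _ ?_
  apply List.filter_congr
  intro p hp
  rcases (PySem.List.mem_pyRange_one).1 hp with ⟨hp0, hp1⟩
  have ha1 : pvAdj cs.length 0 = 0 := by rw [pvAdj, if_neg (by omega)]; omega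
  have ha2 : pvAdj cs.length cs.length = cs.length := by
    rw [pvAdj, if_neg (by omega)]; omega
  have e1 : decide (pvAdj cs.length 0 ≤ p) = true :=
    decide_eq_true (by rw [ha1]; exact hp0)
  have e2 : decide (p < pvAdj cs.length cs.length) = true :=
    decide_eq_true (by rw [ha2]; exact hp1)
  rw [e1, e2]
  simp

-- on a strictly increasing list, filtering by an upper bound is a takeWhile
lemma pvFilter_eq_takeWhile (ps : List Int) (b : Int) (h : ps.Pairwise (· < ·)) :
    ps.filter (fun p => decide (p < b)) = ps.takeWhile (fun p => decide (p < b)) := by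
  induction ps with
  | nil => rfl
  | cons a t ih =>
    rcases List.pairwise_cons.1 h with ⟨ha, ht⟩
    by_cases hq : a < b
    · rw [List.filter_cons_of_pos (by simpa using hq),
        List.takeWhile_cons_of_pos (by simpa using hq), ih ht]
    · rw [List.filter_cons_of_neg (by simpa using hq),
        List.takeWhile_cons_of_neg (by simpa using hq)]
      rw [List.filter_eq_nil_iff.2 ?_]
      intro x hx
      have := ha x hx
      simp only [decide_eq_true_eq]
      omega

lemma pvGetLast_filter {t : List Int} {c : Int} (q : Int → Bool)
    (h : t.getLast? = some c) (hq : q c = true) : (t.filter q).getLast? = some c := by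
  obtain ⟨l', rfl⟩ := List.getLast?_eq_some_iff.1 h
  rw [List.filter_append]
  simp [hq]

lemma pvLe_getLast {t : List Int} {c x : Int} (hp : t.Pairwise (· < ·))
    (h : t.getLast? = some c) (hx : x ∈ t) : x ≤ c := by
  obtain ⟨l', rfl⟩ := List.getLast?_eq_some_iff.1 h
  rcases List.mem_append.1 hx with hx' | hx'
  · exact le_of_lt ((List.pairwise_append.1 hp).2.2 x hx' c (by simp))
  · simp only [List.mem_singleton] at hx'; omega

lemma pvTakeWhile_stop (q : Int → Bool) :
    ∀ (l : List Int) (x : Int), l[(l.takeWhile q).length]? = some x → q x = false := by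
  intro l
  induction l with
  | nil => intro x hx; simp at hx
  | cons a t ih =>
    intro x hx
    by_cases hqa : q a
    · rw [List.takeWhile_cons_of_pos hqa] at hx
      simp only [List.length_cons, List.getElem?_cons_succ] at hx
      exact ih x hx
    · rw [List.takeWhile_cons_of_neg hqa] at hx
      simp only [List.length_nil, List.getElem?_cons_zero, Option.some.injEq] at hx
      subst hx
      simpa using hqa

lemma pvAdvance_stop (ps : List Int) (b : Int) (fuel : Nat) :
    pvAdvance ps b fuel (ps.takeWhile (fun p => decide (p < b))).length
      = (ps.takeWhile (fun p => decide (p < b))).length := by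
  cases fuel with
  | zero => rfl
  | succ fuel => ?_
  rw [pvAdvance]
  split
  · next h =>
    have hstop : ¬ (ps[(ps.takeWhile (fun p => decide (p < b))).length]'h < b) := by
      have h2 := pvTakeWhile_stop (fun p => decide (p < b)) ps
        (ps[(ps.takeWhile (fun p => decide (p < b))).length]'h)
        (List.getElem?_eq_getElem h)
      simpa using h2
    rw [if_neg hstop]
  · rfl

-- the inner while loop reaches the length of the takeWhile prefix
lemma pvAdvance_eq (ps : List Int) (b : Int) :
    ∀ (fuel j : Nat), j ≤ (ps.takeWhile (fun p => decide (p < b))).length →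
    (ps.takeWhile (fun p => decide (p < b))).length - j ≤ fuel →
    pvAdvance ps b fuel j = (ps.takeWhile (fun p => decide (p < b))).length := by
  set k := (ps.takeWhile (fun p => decide (p < b))).length with hk
  intro fuel
  induction fuel with
  | zero =>
    intro j hj2 hm
    have hjk : j = k := by omega
    subst hjk
    rfl
  | succ fuel ih =>
    intro j hj2 hm
    by_cases hjk : j = k
    · subst hjk; exact pvAdvance_stop ps b _
    · have hjlt : j < k := by omega
      have hkle : k ≤ ps.length := by
        rw [hk]; exact (List.takeWhile_prefix _).length_le
      have hjps : j < ps.length := by omega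
      have hq : decide (ps[j] < b) = true := by
        have hpre : ps.takeWhile (fun p => decide (p < b)) <+: ps := List.takeWhile_prefix _
        have h1 : (ps.takeWhile (fun p => decide (p < b)))[j]'(by omega) = ps[j] :=
          hpre.getElem (by omega)
        have h2 := List.mem_takeWhile_imp
          (List.getElem_mem (by omega : j < (ps.takeWhile (fun p => decide (p < b))).length))
        rw [h1] at h2
        exact h2
      rw [pvAdvance, dif_pos hjps, if_pos (of_decide_eq_true hq)]
      exact ih (j + 1) (by omega) (by omega)

lemma pvTakeWhile_mono (ps : List Int) (b1 b2 : Int) (h : b1 ≤ b2) :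
    (ps.takeWhile (fun p => decide (p < b1))).length ≤
    (ps.takeWhile (fun p => decide (p < b2))).length := by
  induction ps with
  | nil => simp
  | cons a t ih =>
    by_cases h1 : a < b1
    · rw [List.takeWhile_cons_of_pos (by simpa using h1),
        List.takeWhile_cons_of_pos (by simp; omega)]
      simpa using ih
    · rw [List.takeWhile_cons_of_neg (by simpa using h1)]
      simp

-- a non-last element of the space list has a successor within `len`
lemma pvSucc {len : Int} {ps : List Int} {x : Int}
    (hc : ∀ pr ∈ ps.zip ps.tail, pr.2 < pr.1 + len) (hp : ps.Pairwise (· < ·))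
    (hx : x ∈ ps) (hnl : some x ≠ ps.getLast?) : ∃ y ∈ ps, y < x + len ∧ x < y := by
  induction ps with
  | nil => cases hx
  | cons a t ih =>
    rcases List.mem_cons.1 hx with rfl | hxt
    · cases t with
      | nil => simp at hnl
      | cons bb t' =>
        refine ⟨bb, by simp, ?_, (List.pairwise_cons.1 hp).1 bb (by simp)⟩
        exact hc (x, bb) (by simp [List.zip_cons_cons])
    · have htne : t ≠ [] := List.ne_nil_of_mem hxt
      have hgl : (a :: t).getLast? = t.getLast? := by
        cases t with
        | nil => exact absurd rfl htne
        | cons b t' => rfl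
      have hc' : ∀ pr ∈ t.zip t.tail, pr.2 < pr.1 + len := by
        intro pr hpr
        apply hc
        cases t with
        | nil => cases hpr
        | cons b t' =>
          simp only [List.zip_cons_cons, List.tail_cons] at hpr ⊢
          exact List.mem_cons_of_mem _ hpr
      rcases ih hc' (List.pairwise_cons.1 hp).2 hxt (by rw [← hgl]; exact hnl)
        with ⟨y, hy, h1, h2⟩
      exact ⟨y, List.mem_cons_of_mem _ hy, h1, h2⟩

-- the two loops agree step by step
lemma pvLoopEq (cs : List Char) (length lastSp : Int)
    (hne : pvSpaces cs ≠ []) (hhead : (pvSpaces cs).headD 0 < length)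
    (hchain : ∀ pr ∈ (pvSpaces cs).zip (pvSpaces cs).tail, pr.2 < pr.1 + length)
    (hlast : (pvSpaces cs).getLast? = some lastSp) :
    ∀ (fuel : Nat) (lb : Int) (j : Nat) (acc : List String),
      0 ≤ lb → lb ≤ cs.length →
      j ≤ ((pvSpaces cs).takeWhile (fun p => decide (p < lb + length))).length →
      (lb = cs.length ∨ lb = 0 ∨ (lb ∈ pvSpaces cs ∧ some lb ≠ (pvSpaces cs).getLast?)) →
      pvALoop cs length lastSp fuel lb lb acc = pvBLoop cs length (pvSpaces cs) fuel lb lb j acc := by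
  intro fuel
  induction fuel with
  | zero => intro lb j acc _ _ _ _; rfl
  | succ fuel ih =>
    intro lb j acc h0 hn hj hdisj
    by_cases hlt : lb < (cs.length : Int)
    · -- the loop body runs
      have hheadmem : (pvSpaces cs).headD 0 ∈ pvSpaces cs := by
        cases hps : pvSpaces cs with
        | nil => exact absurd hps hne
        | cons a t => simp
      have hlen : (0 : Int) < length := by
        have := (pvSpaces_mem hheadmem).1
        omega
      -- the candidate boundary c
      have hW : ∃ w ∈ pvSpaces cs, lb ≤ w ∧ w < lb + length := by
        rcases hdisj with h | h | ⟨hmem, hnl⟩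
        · omega
        · subst h
          exact ⟨(pvSpaces cs).headD 0, hheadmem, (pvSpaces_mem hheadmem).1, by omega⟩
        · rcases pvSucc hchain (pvSpaces_pairwise cs) hmem hnl with ⟨y, hy, hR, hlty⟩
          exact ⟨y, hy, le_of_lt hlty, by omega⟩
      rcases hW with ⟨w, hwmem, hwlb, hwub⟩
      set t := (pvSpaces cs).filter (fun p => decide (p < lb + length)) with ht
      have hwt : w ∈ t := List.mem_filter.2 ⟨hwmem, by simpa using hwub⟩
      have htne : t ≠ [] := List.ne_nil_of_mem hwt
      obtain ⟨c, hc⟩ : ∃ c, t.getLast? = some c :=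
        Option.isSome_iff_exists.1 (List.getLast?_isSome.2 htne)
      have hct : c ∈ t := List.mem_of_getLast? hc
      have hcps : c ∈ pvSpaces cs := List.mem_of_mem_filter hct
      have hcub : c < lb + length := by simpa using List.of_mem_filter hct
      have hpt : t.Pairwise (· < ·) :=
        List.Pairwise.sublist List.filter_sublist (pvSpaces_pairwise cs)
      have hlbc : lb ≤ c := le_trans hwlb (pvLe_getLast hpt hc hwt)
      have hc0 : 0 ≤ c := (pvSpaces_mem hcps).1
      have hcn : c < cs.length := (pvSpaces_mem hcps).2.1
      -- progress: either c is strictly beyond lb or c is the last space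
      have hprog : lb < c ∨ some c = (pvSpaces cs).getLast? := by
        by_cases heq : lb = c
        · right
          by_contra hne'
          rcases pvSucc hchain (pvSpaces_pairwise cs) hcps hne' with ⟨y, hy, hR, hylt⟩
          have hyt : y ∈ t := List.mem_filter.2 ⟨hy, by simp; omega⟩
          have := pvLe_getLast hpt hc hyt
          omega
        · left; omega
      -- A's rindex finds c
      have hA : pvRindexSpace cs lb (lb + length) = some c := by
        rw [pvRindex_window cs lb length h0 hn hlen]
        have hsplit : (pvSpaces cs).filter (fun p => decide (lb ≤ p) && decide (p < lb + length))
            = t.filter (fun p => decide (lb ≤ p)) := by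
          rw [ht, List.filter_filter]
        rw [hsplit]
        exact pvGetLast_filter _ hc (by simpa using hlbc)
      -- B's pointer lands on c
      have htw : t = (pvSpaces cs).takeWhile (fun p => decide (p < lb + length)) :=
        pvFilter_eq_takeWhile _ _ (pvSpaces_pairwise cs)
      have hadv : pvAdvance (pvSpaces cs) (lb + length) ((pvSpaces cs).length - j) j
          = t.length := by
        rw [htw]
        have hkle : ((pvSpaces cs).takeWhile (fun p => decide (p < lb + length))).length
            ≤ (pvSpaces cs).length := (List.takeWhile_prefix _).length_le
        exact pvAdvance_eq _ _ _ j hj (by omega)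
      have htlen : t.length ≠ 0 := by
        simpa [List.length_eq_zero_iff] using htne
      have hidx : (pvSpaces cs)[t.length - 1]? = some c := by
        have hpre : t <+: pvSpaces cs := htw ▸ List.takeWhile_prefix _
        have hlt' : t.length - 1 < t.length := by omega
        have hcel : t[t.length - 1]'hlt' = c := by
          have h' := hc
          rw [List.getLast?_eq_getElem?, List.getElem?_eq_getElem hlt'] at h'
          exact Option.some.inj h'
        rw [List.getElem?_eq_getElem (lt_of_lt_of_le hlt' hpre.length_le)]
        exact congrArg some ((hpre.getElem hlt').symm.trans hcel)
      -- one synchronised step of both loops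
      rw [pvALoop, pvBLoop, if_pos hlt, if_pos hlt, hA, hadv]
      dsimp only
      rw [if_neg htlen, hidx]
      dsimp only
      rw [if_neg (not_lt.2 hlbc)]
      have hcond : ((pvSpaces cs).getLast? = some c) = (c = lastSp) := by
        rw [hlast]
        apply propext
        constructor
        · intro h'; exact (Option.some.inj h').symm
        · intro h'; rw [h']
      simp only [hcond]
      -- recurse via the induction hypothesis
      apply ih
      · split <;> omega
      · split <;> omega
      · have hstep : t.length = ((pvSpaces cs).takeWhile (fun p => decide (p < lb + length))).length := by
          rw [← htw]
        rw [hstep]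
        apply pvTakeWhile_mono
        split <;> omega
      · split
        · next hceq => left; rfl
        · next hcne =>
          right; right
          refine ⟨hcps, ?_⟩
          rw [hlast]
          intro h'
          exact hcne (Option.some.inj h')
    · -- the loop guard fails on both sides
      rw [pvALoop, pvBLoop, if_neg hlt, if_neg hlt]

-- ===== VERDICT (by name: the statement is the Claim_ definition above) =====
theorem split_by_spaces_spec : Claim_equal_split_by_spaces := by
  intro string length _hDom hPre
  obtain ⟨hne, hhead, hchain⟩ := hPre
  obtain ⟨lastSp, hlast⟩ : ∃ l, (pvSpaces string.toList).getLast? = some l :=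
    Option.isSome_iff_exists.1 (List.getLast?_isSome.2 hne)
  have hemp : (pvSpaces string.toList).isEmpty = false := by
    rcases hps : pvSpaces string.toList with _ | ⟨a, t⟩
    · exact absurd hps hne
    · rfl
  unfold Spec_split_by_spaces split_by_spaces split_by_spaces_alt
  simp only [pvRindex_full, hlast, hemp, Bool.false_eq_true, if_false]
  exact pvLoopEq string.toList length lastSp hne hhead hchain hlast _ 0 0 []
    le_rfl (Int.natCast_nonneg _) (Nat.zero_le _) (Or.inr (Or.inl rfl))
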